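-- pv_equiv track=rewrite | github.com/aryanshygun/Quera-Python-Beginner | Finished Questions/تک تک اردک.py | tak
-- ===== SOURCE A (Python) =====
-- def tak(x, xlist):
--     if len(xlist) == 1:
--         return xlist[0]
--     else:
--         ylist = []
--         count = x % 2
--         for i in range(count, len(xlist), 2):
--             ylist.append(xlist[i])
--
--         if (len(xlist)) / len(ylist) == 2:
--             xlist = ylist
--             return tak(x, xlist)
--         else:
--             x += 1
--             xlist = ylist
--             return tak(x, xlist)
--
-- xlist = []
--
-- x = 0
-- ===== SOURCE B (Python) =====
-- def tak(x, xlist):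
--     n = len(xlist)
--     start = 0
--     step = 1
--     p = x % 2
--     while n > 1:
--         m = (n - p + 1) // 2
--         start = start + p * step
--         step = step * 2
--         if n % 2 == 1:
--             p = 1 - p
--         n = m
--     return xlist[start]
-- ===== Notes on version B (the rewrite author's own statement) =====
-- stated objective: faster
-- what changed: Instead of recursively materialising every-other-element sublists, B tracks the survivor's index in the original list with (start, step, parity) arithmetic and does one final lookup, O(log n) loop iterations with no list building.
-- outside the precondition, e.g. on tak(0, []): A raises ZeroDivisionError, B raises IndexError
import Mathlib
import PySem

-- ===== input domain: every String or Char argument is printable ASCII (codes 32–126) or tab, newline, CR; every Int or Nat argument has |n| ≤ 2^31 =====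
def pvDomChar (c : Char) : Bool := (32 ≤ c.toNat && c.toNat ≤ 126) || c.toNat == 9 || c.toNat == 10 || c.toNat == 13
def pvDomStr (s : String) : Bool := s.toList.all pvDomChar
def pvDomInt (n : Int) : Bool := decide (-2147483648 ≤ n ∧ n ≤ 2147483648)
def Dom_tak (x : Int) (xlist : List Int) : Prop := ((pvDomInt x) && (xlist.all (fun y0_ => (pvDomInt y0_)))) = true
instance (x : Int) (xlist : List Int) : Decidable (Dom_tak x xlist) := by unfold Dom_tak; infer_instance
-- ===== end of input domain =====

-- B tracks the survivor's index with (start, step, parity) arithmetic instead of building the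
-- every-other-element sublists recursively (objective: faster; loop runs O(log n) times).

-- ===== PORT A =====
-- the for-loop building ylist: for i in range(count, len(xlist), 2): ylist.append(xlist[i])
-- (xlist[i] is always in range here, so the total pyGetD is exact)
def takYlist (x : Int) (xlist : List Int) : List Int :=
  (PySem.List.pyRange (PySem.Int.mod x 2) (xlist.length : Int) 2).foldl
    (fun acc i => acc ++ [PySem.List.pyGetD xlist i 0]) []

-- needed by tak's termination proof (cited in decreasing_by)
theorem takYlist_length (x : Int) (xlist : List Int) :
    (takYlist x xlist).length =
      (if PySem.Int.mod x 2 < (xlist.length : Int)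
        then (((xlist.length : Int) - PySem.Int.mod x 2 + 2 - 1) / 2).toNat else 0) := by
  unfold takYlist
  rw [PySem.List.foldl_append_singleton_eq_map, PySem.List.pyRange_of_pos _ _ (by norm_num)]
  simp

def tak (x : Int) (xlist : List Int) : Int :=
  if xlist.length = 1 then PySem.List.pyGetD xlist 0 0
  -- ylist is the list the for-loop builds (helper takYlist above)
  else if (takYlist x xlist).length = 0 then 0  -- Python raises ZeroDivisionError here (only for xlist = []); excluded by Pre_tak
  -- 'len(xlist) / len(ylist) == 2' (true float division) holds exactly iff len(xlist) = 2*len(ylist);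
  -- exact for every length a Dom_tak list can have (far below 2^53)
  else if (xlist.length : Int) = 2 * ((takYlist x xlist).length : Int) then tak x (takYlist x xlist)
  else tak (x + 1) (takYlist x xlist)
termination_by xlist.length
decreasing_by
  all_goals
  · have h := takYlist_length x xlist
    have hm := PySem.Int.mod_two_eq x
    split at h <;> omega

-- ===== PORT B =====
-- the while-loop of Source B; n, start, step, p are nonnegative throughout in Source B, so Nat state is exact
def takAltGo (n start step p : Nat) : Nat :=
  if n > 1 then
    takAltGo ((n - p + 1) / 2) (start + p * step) (step * 2) (if n % 2 = 1 then 1 - p else p)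
  else start
termination_by n
decreasing_by omega

def tak_alt (x : Int) (xlist : List Int) : Int :=
  PySem.List.pyGetD xlist ((takAltGo xlist.length 0 1 (PySem.Int.mod x 2).toNat : Nat) : Int) 0

-- ===== PRECONDITION & SPEC =====
-- A raises ZeroDivisionError on the empty list (len(ylist) = 0); B raises IndexError there too.
def Pre_tak (x : Int) (xlist : List Int) : Prop := xlist ≠ []
instance (x : Int) (xlist : List Int) : Decidable (Pre_tak x xlist) := by unfold Pre_tak; infer_instance
def pvWitness_tak : Int × List Int := (3, [10, 20, 30, 40, 50])

def Spec_tak (x : Int) (xlist : List Int) (out : Int) : Prop := out = tak_alt x xlist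
instance (x : Int) (xlist : List Int) (out : Int) : Decidable (Spec_tak x xlist out) := by unfold Spec_tak; infer_instance

-- ===== CLAIM (what is proved, stated in full; the proofs are below) =====
def Claim_equal_tak : Prop := ∀ (x : Int) (xlist : List Int), Dom_tak x xlist → Pre_tak x xlist → Spec_tak x xlist (tak x xlist)

-- ===== LEMMAS AND PROOFS =====

-- the "virtual sublist" of L seen through (start, step): entries L[s + j*k] for j < n
def extr (L : List Int) (s k n : Nat) : List Int :=
  (List.range n).map (fun j => L.getD (s + j * k) 0)

theorem extr_self (L : List Int) : extr L 0 1 L.length = L := by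
  apply List.ext_getElem
  · simp [extr]
  · intro i h1 h2
    simp [extr, List.getD_eq_getElem?_getD, List.getElem?_eq_getElem h2]

theorem mod_add_one_two (x : Int) : PySem.Int.mod (x + 1) 2 = 1 - PySem.Int.mod x 2 := by
  rw [PySem.Int.mod_eq_emod_of_pos (show (0:Int) < 2 by norm_num),
      PySem.Int.mod_eq_emod_of_pos (show (0:Int) < 2 by norm_num)]
  omega

-- A's ylist built from a virtual sublist is again a virtual sublist
theorem takYlist_extr (x : Int) (L : List Int) (s k n : Nat) (hn : 2 ≤ n) :
    takYlist x (extr L s k n) =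
      extr L (s + (PySem.Int.mod x 2).toNat * k) (2 * k)
        ((n - (PySem.Int.mod x 2).toNat + 1) / 2) := by
  have hm := PySem.Int.mod_two_eq x
  set c : Int := PySem.Int.mod x 2 with hc
  have hlen : (extr L s k n).length = n := by simp [extr]
  unfold takYlist
  rw [PySem.List.foldl_append_singleton_eq_map, hlen,
      PySem.List.pyRange_of_pos _ _ (show (0:Int) < 2 by norm_num)]
  rw [if_pos (by omega)]
  have hmn : ((n : Int) - c + 2 - 1) / 2 = ((n - c.toNat + 1) / 2 : Nat) := by omega
  rw [hmn, Int.toNat_natCast]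
  unfold extr
  rw [List.map_map]
  apply List.map_congr_left
  intro j hj
  simp only [List.mem_range] at hj
  simp only [Function.comp]
  have hidx : c + 2 * (j : Int) = ((c.toNat + 2 * j : Nat) : Int) := by omega
  rw [hidx, PySem.List.pyGetD_natCast]
  rw [PySem.List.getD_map_range _ _ _ _ (by omega)]
  congr 1
  ring

-- main invariant: A on the virtual sublist = the entry B's index loop points at
theorem key (n : Nat) : ∀ (L : List Int) (s k : Nat) (x : Int), 1 ≤ n →
    tak x (extr L s k n) = L.getD (takAltGo n s k (PySem.Int.mod x 2).toNat) 0 := by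
  induction n using Nat.strong_induction_on with
  | _ n ih =>
    intro L s k x hn
    have hm := PySem.Int.mod_two_eq x
    have hlen : (extr L s k n).length = n := by simp [extr]
    rw [tak, takAltGo]
    by_cases h1 : n = 1
    · subst h1
      rw [if_pos hlen, if_neg (show ¬(1 > 1) from by omega)]
      simp [extr, PySem.List.pyGetD]
    · have hn2 : 2 ≤ n := by omega
      set c : Nat := (PySem.Int.mod x 2).toNat with hcd
      have hc : c = 0 ∨ c = 1 := by omega
      have hy := takYlist_extr x L s k n hn2
      rw [Nat.mul_comm 2 k] at hy
      set m : Nat := (n - c + 1) / 2 with hmd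
      have hym : (takYlist x (extr L s k n)).length = m := by rw [hy]; simp [extr]
      have hm1 : 1 ≤ m := by omega
      simp only [hlen, hym]
      rw [if_neg h1, if_neg (show ¬(m = 0) from by omega), if_pos (show n > 1 from by omega)]
      by_cases hev : (n : Int) = 2 * (m : Int)
      · rw [if_pos hev, hy, ih m (by omega) L (s + c * k) (k * 2) x hm1]
        have hp : (PySem.Int.mod x 2).toNat = if n % 2 = 1 then 1 - c else c := by
          rw [if_neg (show ¬(n % 2 = 1) from by omega)]
        rw [hp]
      · rw [if_neg hev, hy, ih m (by omega) L (s + c * k) (k * 2) (x + 1) hm1, mod_add_one_two]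
        have hp : (1 - PySem.Int.mod x 2).toNat = if n % 2 = 1 then 1 - c else c := by
          rw [if_pos (show n % 2 = 1 from by omega)]
          omega
        rw [hp]

-- ===== VERDICT (by name: the statement is the Claim_ definition above) =====
theorem tak_spec : Claim_equal_tak := by
  unfold Claim_equal_tak
  intro x xlist _ hpre
  unfold Spec_tak tak_alt
  have h := key xlist.length xlist 0 1 x (by cases xlist with | nil => exact absurd rfl hpre | cons a t => simp)
  rw [extr_self] at h
  rw [h, PySem.List.pyGetD_natCast]
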